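-- pv_equiv track=rewrite | github.com/yesjm-dev/codingtest | 프로그래머스/2/42626. 더 맵게/더 맵게.py | solution
-- ===== SOURCE A (Python) =====
-- import heapq
--
-- def solution(scoville, K):
--     answer = 0
--     scoville = sorted(scoville)
--     heapq.heapify(scoville)
--     while scoville[0] < K:
--         if len(scoville) < 2:
--             answer = -1
--             break
--         new_scoville = heapq.heappop(scoville) + (heapq.heappop(scoville) * 2)
--         heapq.heappush(scoville, new_scoville)
--         answer += 1
--     return answer
-- ===== SOURCE B (Python) =====
-- def _insort(x, s):
--     # insert x into ascending-sorted s, keeping order (linear scan)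
--     i = 0
--     while i < len(s) and s[i] <= x:
--         i += 1
--     return s[:i] + [x] + s[i:]
--
-- def solution(scoville, K):
--     answer = 0
--     s = sorted(scoville)
--     while s[0] < K:
--         if len(s) < 2:
--             answer = -1
--             break
--         s = _insort(s[0] + s[1] * 2, s[2:])
--         answer += 1
--     return answer
-- ===== Notes on version B (the rewrite author's own statement) =====
-- stated objective: alternative
-- what changed: Replaces the binary heap (heapify/heappop/heappush) by a plain ascending-sorted list: read the two smallest at the front, drop them, and re-insert a+b*2 in order by a linear insertion, so no heap structure is maintained.
import Mathlib
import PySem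

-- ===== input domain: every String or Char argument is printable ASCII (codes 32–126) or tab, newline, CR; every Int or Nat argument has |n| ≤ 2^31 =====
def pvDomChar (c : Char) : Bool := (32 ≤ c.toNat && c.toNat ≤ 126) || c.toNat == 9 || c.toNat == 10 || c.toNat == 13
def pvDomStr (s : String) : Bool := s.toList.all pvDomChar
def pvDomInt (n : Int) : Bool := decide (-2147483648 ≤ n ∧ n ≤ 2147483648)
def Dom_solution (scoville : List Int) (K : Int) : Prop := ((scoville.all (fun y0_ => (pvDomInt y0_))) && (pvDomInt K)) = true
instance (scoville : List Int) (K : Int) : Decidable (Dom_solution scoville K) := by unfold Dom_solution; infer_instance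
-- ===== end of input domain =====

-- B replaces A's binary heap by a plain ascending-sorted list with linear re-insertion (alternative
-- decomposition, not faster). A mutates its local rebound list only; the caller's list is untouched.

-- ===== PORT A =====
-- termination measures of the loops, named so the ports can cite them in decreasing_by
theorem pv_parent_div_lt (s p : Nat) (h : s < p) : (p - 1) / 2 < p := by omega

theorem pv_siftup_dec (x y : Int) (endpos pos : Nat) (h : 2 * pos + 1 < endpos) :
    endpos - (if 2 * pos + 1 + 1 < endpos ∧ ¬ x < y then 2 * pos + 1 + 1 else 2 * pos + 1) <
      endpos - pos := by
  split_ifs <;> omega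

-- heapq._siftdown(heap, startpos, pos): the while-loop moving the hole at pos up towards startpos
def siftdownLoop (heap : List Int) (startpos pos : Nat) (newitem : Int) : List Int × Nat :=
  if h : startpos < pos then
    let parentpos := (pos - 1) / 2
    let pv := heap.getD parentpos 0
    if newitem < pv then siftdownLoop (heap.set pos pv) startpos parentpos newitem
    else (heap, pos)
  else (heap, pos)
termination_by pos
decreasing_by exact pv_parent_div_lt startpos pos h

-- heapq._siftdown: newitem = heap[pos]; loop; heap[pos] = newitem
def siftdown (heap : List Int) (startpos pos : Nat) : List Int :=
  let newitem := heap.getD pos 0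
  let r := siftdownLoop heap startpos pos newitem
  r.1.set r.2 newitem

-- heapq._siftup's while-loop: move the smaller child up until reaching a leaf
def siftupLoop (heap : List Int) (endpos pos : Nat) : List Int × Nat :=
  if h : 2 * pos + 1 < endpos then
    let childpos := 2 * pos + 1
    let rightpos := childpos + 1
    let c := if rightpos < endpos ∧ ¬ (heap.getD childpos 0 < heap.getD rightpos 0) then rightpos else childpos
    siftupLoop (heap.set pos (heap.getD c 0)) endpos c
  else (heap, pos)
termination_by endpos - pos
decreasing_by exact pv_siftup_dec (heap.getD (2 * pos + 1) 0) (heap.getD (2 * pos + 1 + 1) 0) endpos pos h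

-- heapq._siftup(heap, pos)
def siftup (heap : List Int) (pos : Nat) : List Int :=
  let endpos := heap.length
  let startpos := pos
  let newitem := heap.getD pos 0
  let r := siftupLoop heap endpos pos
  siftdown (r.1.set r.2 newitem) startpos r.2

-- heapq.heappush
def heappush (heap : List Int) (item : Int) : List Int :=
  let h := heap ++ [item]
  siftdown h 0 (h.length - 1)

-- heapq.heappop: lastelt = heap.pop(); if heap: return heap[0] after re-sifting else return lastelt
def heappop (heap : List Int) : Int × List Int :=
  let lastelt := heap.getD (heap.length - 1) 0
  let rest := heap.dropLast
  if rest.isEmpty then (lastelt, [])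
  else (rest.getD 0 0, siftup (rest.set 0 lastelt) 0)

-- heapq.heapify: for i in reversed(range(n//2)): _siftup(x, i)
def heapify (l : List Int) : List Int :=
  ((List.range (l.length / 2)).reverse).foldl (fun h i => siftup h i) l

-- length facts needed by solutionLoop's termination
theorem siftdownLoop_length (heap : List Int) (startpos pos : Nat) (newitem : Int) :
    (siftdownLoop heap startpos pos newitem).1.length = heap.length := by
  fun_induction siftdownLoop heap startpos pos newitem <;> simp_all

theorem siftdown_length (heap : List Int) (startpos pos : Nat) :
    (siftdown heap startpos pos).length = heap.length := by
  simp [siftdown, siftdownLoop_length]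

theorem siftupLoop_length (heap : List Int) (endpos pos : Nat) :
    (siftupLoop heap endpos pos).1.length = heap.length := by
  fun_induction siftupLoop heap endpos pos <;> simp_all

theorem siftup_length (heap : List Int) (pos : Nat) :
    (siftup heap pos).length = heap.length := by
  simp [siftup, siftdown_length, siftupLoop_length]

theorem heappush_length (heap : List Int) (item : Int) :
    (heappush heap item).length = heap.length + 1 := by
  simp [heappush, siftdown_length]

theorem heappop_length (heap : List Int) :
    (heappop heap).2.length = heap.length - 1 := by
  by_cases hh : heap.dropLast.isEmpty
  · rw [List.isEmpty_iff] at hh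
    have : heap.length ≤ 1 := by
      have := congrArg List.length hh; simp at this; omega
    simp [heappop, hh, List.isEmpty_iff]
    omega
  · simp [heappop, hh, List.isEmpty_iff, siftup_length] at hh ⊢

theorem pv_loop_dec (a x : Int) (t : List Int) (h : ¬ (a :: t).length < 2) :
    (heappush (heappop (heappop (a :: t)).2).2 x).length < (a :: t).length := by
  simp only [heappush_length, heappop_length]
  omega

-- the while-loop of A's solution
def solutionLoop (heap : List Int) (K : Int) (answer : Int) : Int :=
  match heap with
  | [] => answer          -- Python's scoville[0] raises IndexError here (outside Pre_)
  | a :: t =>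
    if a < K then
      if h2 : (a :: t).length < 2 then -1
      else
        let p1 := heappop (a :: t)
        let p2 := heappop p1.2
        solutionLoop (heappush p2.2 (p1.1 + p2.1 * 2)) K (answer + 1)
    else answer
termination_by heap.length
decreasing_by exact pv_loop_dec a _ t h2

def solution (scoville : List Int) (K : Int) : Int :=
  solutionLoop (heapify (PySem.List.sorted scoville (fun x => x) false)) K 0

-- ===== PORT B =====
-- Source B's _insort: walk the ≤-prefix, then place x (linear insertion into an ascending list)
def insort (x : Int) : List Int → List Int
  | [] => [x]
  | y :: ys => if y ≤ x then y :: insort x ys else x :: y :: ys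

theorem insort_length (x : Int) (s : List Int) : (insort x s).length = s.length + 1 := by
  induction s with
  | nil => rfl
  | cons y ys ih => simp only [insort]; split <;> simp [ih]

theorem pv_insort_len_lt (x a b : Int) (rest : List Int) :
    (insort x rest).length < (a :: b :: rest).length := by
  simp [insort_length]

-- the while-loop of B: front two elements of the sorted list are the two smallest
def altLoop (s : List Int) (K : Int) (answer : Int) : Int :=
  match s with
  | [] => answer          -- Python's s[0] raises IndexError here (outside Pre_)
  | a :: t =>
    if a < K then
      match t with
      | [] => -1          -- len(s) < 2
      | b :: rest => altLoop (insort (a + b * 2) rest) K (answer + 1)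
    else answer
termination_by s.length
decreasing_by exact pv_insort_len_lt (a + b * 2) a b rest

def solution_alt (scoville : List Int) (K : Int) : Int :=
  altLoop (PySem.List.sorted scoville (fun x => x) false) K 0

-- ===== PRECONDITION & SPEC =====
-- Pre_ excludes only the empty list, where Python's scoville[0] raises IndexError (in A and in B).
def Pre_solution (scoville : List Int) (K : Int) : Prop := scoville ≠ []
instance (scoville : List Int) (K : Int) : Decidable (Pre_solution scoville K) := by
  unfold Pre_solution; infer_instance

def pvWitness_solution : List Int × Int := ([1, 2, 9, 3], 10)

def Spec_solution (scoville : List Int) (K : Int) (out : Int) : Prop := out = solution_alt scoville K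
instance (scoville : List Int) (K : Int) (out : Int) : Decidable (Spec_solution scoville K out) := by
  unfold Spec_solution; infer_instance

-- ===== CLAIM (what is proved, stated in full; the proofs are below) =====
def Claim_equal_solution : Prop := ∀ (scoville : List Int) (K : Int), Dom_solution scoville K → Pre_solution scoville K → Spec_solution scoville K (solution scoville K)

-- ===== LEMMAS AND PROOFS =====

-- the binary-heap invariant maintained by heapq: each child is at least its parent
def HP (l : List Int) : Prop := ∀ j, 0 < j → j < l.length → l.getD ((j - 1) / 2) 0 ≤ l.getD j 0

theorem hp_root_le (l : List Int) (h : HP l) : ∀ j, j < l.length → l.getD 0 0 ≤ l.getD j 0 := by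
  intro j
  induction j using Nat.strong_induction_on with
  | _ j ih =>
    intro hj
    rcases Nat.eq_zero_or_pos j with rfl | hjpos
    · exact le_refl _
    · exact le_trans (ih ((j - 1) / 2) (by omega) (by omega)) (h j hjpos hj)

-- "startpos is an ancestor of pos" in the implicit binary tree (heapq's hole always moves along such a path)
def isAnc (s p : Nat) : Bool := if s < p then isAnc s ((p - 1) / 2) else s == p
termination_by p
decreasing_by omega

theorem isAnc_le (s p : Nat) (h : isAnc s p = true) : s ≤ p := by
  fun_induction isAnc s p with
  | case1 p hlt ih => omega
  | case2 p hlt => simp at h; omega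

theorem isAnc_zero (p : Nat) : isAnc 0 p = true := by
  induction p using Nat.strong_induction_on with
  | _ p ih =>
    rw [isAnc]
    rcases Nat.eq_zero_or_pos p with rfl | hp
    · simp
    · simp only [Nat.pos_iff_ne_zero] at hp
      simp [Nat.pos_of_ne_zero hp, ih ((p - 1) / 2) (by omega)]

theorem isAnc_child (s p c : Nat) (h : isAnc s p = true) (hc : c = 2 * p + 1 ∨ c = 2 * p + 2) :
    isAnc s c = true := by
  have hsp := isAnc_le s p h
  rw [isAnc]
  have h1 : s < c := by omega
  have h2 : (c - 1) / 2 = p := by omega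
  simp [h1, h2, h]

theorem getD_set' (l : List Int) (i j : Nat) (x : Int) (hi : i < l.length) :
    (l.set i x).getD j 0 = if j = i then x else l.getD j 0 := by
  rcases eq_or_ne j i with rfl | h
  · rw [if_pos rfl]; simp [List.getD_eq_getElem?_getD, hi]
  · rw [if_neg h]; simp [List.getD_eq_getElem?_getD, List.getElem?_set_ne (Ne.symm h)]

theorem set_cross (t : List Int) : ∀ (n : Nat) (a x : Int), n < t.length →
    (x :: t.set n a).Perm (a :: t.set n x) := by
  induction t with
  | nil => intro n a x h; simp at h
  | cons b u ih =>
    intro n a x h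
    cases n with
    | zero => simpa [List.set] using List.Perm.swap a x u
    | succ m =>
      simp only [List.set]
      exact (List.Perm.swap b x _).trans (((ih m a x (by simpa using h)).cons b).trans
        (List.Perm.swap a b _))

theorem set_transfer (l : List Int) : ∀ (i j : Nat) (x : Int), i < l.length → j < l.length → i ≠ j →
    ((l.set i (l.getD j 0)).set j x).Perm (l.set i x) := by
  induction l with
  | nil => intro i j x h; simp at h
  | cons b u ih =>
    intro i j x hi hj hij
    cases i with
    | zero =>
      cases j with
      | zero => exact absurd rfl hij
      | succ m =>
        simp only [List.set, List.getD_cons_succ]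
        have hm : m < u.length := by simpa using hj
        have h2 := set_cross u m x (u.getD m 0) hm
        rw [List.getD_eq_getElem u 0 hm, List.set_getElem_self hm] at h2
        rw [List.getD_eq_getElem u 0 hm]
        exact h2
    | succ n =>
      cases j with
      | zero =>
        simp only [List.set, List.getD_cons_zero]
        exact set_cross u n b x (by simpa using hi)
      | succ m =>
        simp only [List.set, List.getD_cons_succ]
        exact (ih n m x (by simpa using hi) (by simpa using hj) (by omega)).cons b

theorem siftdownLoop_spec (heap : List Int) (startpos pos : Nat) (newitem : Int) :
    pos < heap.length →
    isAnc startpos pos = true →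
    (∀ j, 0 < j → j < heap.length → j ≠ pos → (j - 1) / 2 ≠ pos →
      heap.getD ((j - 1) / 2) 0 ≤ heap.getD j 0) →
    (∀ j, 0 < j → j < heap.length → (j - 1) / 2 = pos → newitem ≤ heap.getD j 0) →
    (∀ j, 0 < j → j < heap.length → (j - 1) / 2 = pos → 0 < pos →
      heap.getD ((pos - 1) / 2) 0 ≤ heap.getD j 0) →
    (0 < startpos → heap.getD ((startpos - 1) / 2) 0 ≤ newitem) →
    (∀ x, ((siftdownLoop heap startpos pos newitem).1.set
        (siftdownLoop heap startpos pos newitem).2 x).Perm (heap.set pos x))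
    ∧ HP ((siftdownLoop heap startpos pos newitem).1.set
        (siftdownLoop heap startpos pos newitem).2 newitem) := by
  fun_induction siftdownLoop heap startpos pos newitem with
  | case1 heap pos hsp parentpos pv hlt ih =>
    intro hpos hanc hA hB hD hE
    have hparlt : parentpos < pos := by simp only [parentpos]; omega
    have hparlen : parentpos < heap.length := by omega
    have hlen : (heap.set pos pv).length = heap.length := by simp
    have hg : ∀ j, (heap.set pos pv).getD j 0 = if j = pos then pv else heap.getD j 0 :=
      fun j => getD_set' heap pos j pv hpos
    have hanc' : isAnc startpos parentpos = true := by
      rw [isAnc, if_pos hsp] at hanc; exact hanc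
    have hpos0 : 0 < pos := by omega
    obtain ⟨hperm, hhp⟩ := ih (by omega) hanc'
      (by -- A'
        intro j hj0 hjlen hj1 hj2
        rw [hlen] at hjlen
        have hjp : j ≠ pos := fun hE' => hj2 (by rw [hE'])
        rw [hg j, hg ((j - 1) / 2), if_neg hjp]
        by_cases hcp : (j - 1) / 2 = pos
        · rw [if_pos hcp]
          simp only [pv]
          exact hD j hj0 hjlen hcp hpos0
        · rw [if_neg hcp]
          exact hA j hj0 hjlen hjp hcp)
      (by -- B'
        intro j hj0 hjlen hcp
        rw [hlen] at hjlen
        rw [hg j]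
        by_cases hjp : j = pos
        · rw [if_pos hjp]; exact le_of_lt hlt
        · rw [if_neg hjp]
          have : parentpos ≠ pos := by omega
          have h3 := hA j hj0 hjlen hjp (by rw [hcp]; exact this)
          rw [hcp] at h3
          exact le_trans (le_of_lt hlt) h3)
      (by -- D'
        intro j hj0 hjlen hcp hpar0
        rw [hlen] at hjlen
        have hgpar : (parentpos - 1) / 2 ≠ pos := by omega
        have hparne : parentpos ≠ pos := by omega
        have hstep : heap.getD ((parentpos - 1) / 2) 0 ≤ heap.getD parentpos 0 :=
          hA parentpos hpar0 hparlen hparne (by omega)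
        rw [hg ((parentpos - 1) / 2), if_neg hgpar, hg j]
        by_cases hjp : j = pos
        · rw [if_pos hjp]; exact hstep
        · rw [if_neg hjp]
          have h3 := hA j hj0 hjlen hjp (by rw [hcp]; exact hparne)
          rw [hcp] at h3
          exact le_trans hstep h3)
      (by -- E'
        intro hst0
        have : (startpos - 1) / 2 ≠ pos := by
          have := isAnc_le startpos parentpos hanc'
          omega
        rw [hg _, if_neg this]
        exact hE hst0)
    constructor
    · intro x
      refine (hperm x).trans ?_
      exact set_transfer heap pos parentpos x hpos hparlen (by omega)
    · exact hhp
  | case2 heap pos hsp parentpos pv hlt =>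
    intro hpos hanc hA hB hD hE
    refine ⟨fun x => List.Perm.refl _, ?_⟩
    intro j hj0 hjlen
    rw [List.length_set] at hjlen
    have hg : ∀ j, (heap.set pos newitem).getD j 0 = if j = pos then newitem else heap.getD j 0 :=
      fun j => getD_set' heap pos j newitem hpos
    rw [hg j, hg ((j - 1) / 2)]
    by_cases hjp : j = pos
    · have hppar : (j - 1) / 2 ≠ pos := by omega
      rw [if_pos hjp, if_neg hppar, hjp]
      simp only [parentpos, pv] at hlt
      omega
    · rw [if_neg hjp]
      by_cases hcp : (j - 1) / 2 = pos
      · rw [if_pos hcp]; exact hB j hj0 hjlen hcp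
      · rw [if_neg hcp]; exact hA j hj0 hjlen hjp hcp
  | case3 heap pos hsp =>
    intro hpos hanc hA hB hD hE
    have hspeq : startpos = pos := by
      rw [isAnc, if_neg hsp] at hanc; simpa using hanc
    refine ⟨fun x => List.Perm.refl _, ?_⟩
    intro j hj0 hjlen
    rw [List.length_set] at hjlen
    have hg : ∀ j, (heap.set pos newitem).getD j 0 = if j = pos then newitem else heap.getD j 0 :=
      fun j => getD_set' heap pos j newitem hpos
    rw [hg j, hg ((j - 1) / 2)]
    by_cases hjp : j = pos
    · have hppar : (j - 1) / 2 ≠ pos := by omega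
      rw [if_pos hjp, if_neg hppar, hjp]
      subst hspeq
      exact hE (by omega)
    · rw [if_neg hjp]
      by_cases hcp : (j - 1) / 2 = pos
      · rw [if_pos hcp]; exact hB j hj0 hjlen hcp
      · rw [if_neg hcp]; exact hA j hj0 hjlen hjp hcp

theorem isAnc_trans (a b : Nat) : ∀ c, isAnc a b = true → isAnc b c = true → isAnc a c = true := by
  intro c
  induction c using Nat.strong_induction_on with
  | _ c ih =>
    intro h1 h2
    rw [isAnc] at h2
    by_cases hbc : b < c
    · rw [if_pos hbc] at h2
      have hac : a < c := lt_of_le_of_lt (isAnc_le a b h1) hbc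
      rw [isAnc, if_pos hac]
      exact ih ((c - 1) / 2) (by omega) h1 h2
    · rw [if_neg hbc] at h2
      simp at h2
      subst h2
      exact h1

theorem isAnc_self (s : Nat) : isAnc s s = true := by
  rw [isAnc]; simp

theorem siftupLoop_spec (heap : List Int) (endpos pos : Nat) :
    endpos = heap.length → pos < endpos →
    (∀ j, 0 < j → j < endpos → j ≠ pos → (j - 1) / 2 ≠ pos →
      heap.getD ((j - 1) / 2) 0 ≤ heap.getD j 0) →
    (∀ j, 0 < j → j < endpos → (j - 1) / 2 = pos → 0 < pos →
      heap.getD ((pos - 1) / 2) 0 ≤ heap.getD j 0) →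
    (∀ x, ((siftupLoop heap endpos pos).1.set (siftupLoop heap endpos pos).2 x).Perm
        (heap.set pos x)) ∧
    (siftupLoop heap endpos pos).2 < endpos ∧
    endpos ≤ 2 * (siftupLoop heap endpos pos).2 + 1 ∧
    isAnc pos (siftupLoop heap endpos pos).2 = true ∧
    (∀ j, 0 < j → j < endpos → j ≠ (siftupLoop heap endpos pos).2 →
      (j - 1) / 2 ≠ (siftupLoop heap endpos pos).2 →
      (siftupLoop heap endpos pos).1.getD ((j - 1) / 2) 0 ≤ (siftupLoop heap endpos pos).1.getD j 0) ∧
    (∀ k, k < pos → (siftupLoop heap endpos pos).1.getD k 0 = heap.getD k 0) := by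
  fun_induction siftupLoop heap endpos pos with
  | case1 heap pos h childpos rightpos c ih =>
    intro hlen hpos hA hB
    have hpl : pos < heap.length := by omega
    have hr2 : rightpos = 2 * pos + 2 := by simp only [rightpos, childpos]
    have hc2 : childpos = 2 * pos + 1 := by simp only [childpos]
    have hc : c = 2 * pos + 1 ∨ c = 2 * pos + 2 := by
      simp only [c, rightpos, childpos]; split_ifs <;> omega
    have hclt : c < endpos := by
      simp only [c, rightpos, childpos]; split_ifs <;> omega
    have hcpos : pos < c := by omega
    have hcpar : (c - 1) / 2 = pos := by omega
    have hg : ∀ j, (heap.set pos (heap.getD c 0)).getD j 0 =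
        if j = pos then heap.getD c 0 else heap.getD j 0 :=
      fun j => getD_set' heap pos j _ hpl
    have hmin : ∀ j, 0 < j → j < endpos → (j - 1) / 2 = pos →
        heap.getD c 0 ≤ heap.getD j 0 := by
      intro j hj0 hjlt hpar
      have hj : j = 2 * pos + 1 ∨ j = 2 * pos + 2 := by omega
      by_cases hrt : rightpos < endpos ∧ ¬(heap.getD childpos 0 < heap.getD rightpos 0)
      · have hceq : c = rightpos := by simp only [c]; rw [dif_pos hrt]
        have hle := not_lt.mp hrt.2
        rw [hc2, hr2] at hle
        rw [hceq, hr2]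
        rcases hj with rfl | rfl
        · exact hle
        · exact le_refl _
      · have hceq : c = childpos := by simp only [c]; rw [dif_neg hrt]
        rw [hceq, hc2]
        rcases hj with rfl | rfl
        · exact le_refl _
        · have hlt2 : heap.getD childpos 0 < heap.getD rightpos 0 := by
            by_contra hno
            exact hrt ⟨by omega, hno⟩
          rw [hc2, hr2] at hlt2
          exact le_of_lt hlt2
    obtain ⟨hperm, hrlt, hleaf, hanc, hAout, hbelow⟩ := ih (by simp [hlen]) hclt
      (by -- A for the recursive state
        intro j hj0 hjlt hj1 hj2
        rw [hg j, hg ((j - 1) / 2)]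
        by_cases hjp : j = pos
        · subst hjp
          have hppar : (j - 1) / 2 ≠ j := by omega
          rw [if_pos rfl, if_neg hppar]
          exact hB c (by omega) hclt hcpar (by omega)
        · rw [if_neg hjp]
          by_cases hcp : (j - 1) / 2 = pos
          · rw [if_pos hcp]
            exact hmin j hj0 hjlt hcp
          · rw [if_neg hcp]
            exact hA j hj0 hjlt hjp hcp)
      (by -- B for the recursive state
        intro j hj0 hjlt hjpar hc0
        rw [hcpar, hg pos, hg j, if_pos rfl, if_neg (by omega : j ≠ pos)]
        have h3 := hA j hj0 hjlt (by omega) (by rw [hjpar]; omega)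
        rw [hjpar] at h3
        exact h3)
    refine ⟨?_, hrlt, hleaf, isAnc_trans pos c _ (isAnc_child pos pos c (isAnc_self pos) hc) hanc,
      hAout, ?_⟩
    · intro x
      exact (hperm x).trans (set_transfer heap pos c x hpl (by omega) (by omega))
    · intro k hk
      rw [hbelow k (lt_trans hk hcpos), hg k, if_neg (by omega)]
  | case2 heap pos h =>
    intro hlen hpos hA hB
    exact ⟨fun x => List.Perm.refl _, hpos, by omega, isAnc_self pos, hA, fun k hk => rfl⟩

theorem siftdown_spec (heap : List Int) (startpos pos : Nat)
    (hpos : pos < heap.length) (hanc : isAnc startpos pos = true)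
    (hA : ∀ j, 0 < j → j < heap.length → j ≠ pos → (j - 1) / 2 ≠ pos →
      heap.getD ((j - 1) / 2) 0 ≤ heap.getD j 0)
    (hB : ∀ j, 0 < j → j < heap.length → (j - 1) / 2 = pos → heap.getD pos 0 ≤ heap.getD j 0)
    (hD : ∀ j, 0 < j → j < heap.length → (j - 1) / 2 = pos → 0 < pos →
      heap.getD ((pos - 1) / 2) 0 ≤ heap.getD j 0)
    (hE : 0 < startpos → heap.getD ((startpos - 1) / 2) 0 ≤ heap.getD pos 0) :
    (siftdown heap startpos pos).Perm heap ∧ HP (siftdown heap startpos pos) := by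
  obtain ⟨hperm, hhp⟩ :=
    siftdownLoop_spec heap startpos pos (heap.getD pos 0) hpos hanc hA hB hD hE
  have hdef : siftdown heap startpos pos =
      (siftdownLoop heap startpos pos (heap.getD pos 0)).1.set
        (siftdownLoop heap startpos pos (heap.getD pos 0)).2 (heap.getD pos 0) := rfl
  rw [hdef]
  refine ⟨?_, hhp⟩
  have hset : heap.set pos (heap.getD pos 0) = heap := by
    rw [List.getD_eq_getElem heap 0 hpos]; exact List.set_getElem_self hpos
  have h2 := hperm (heap.getD pos 0)
  rw [hset] at h2
  exact h2

theorem siftup_spec (heap : List Int) (pos : Nat) (hpos : pos < heap.length)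
    (hA : ∀ j, 0 < j → j < heap.length → j ≠ pos → (j - 1) / 2 ≠ pos →
      heap.getD ((j - 1) / 2) 0 ≤ heap.getD j 0)
    (hB : ∀ j, 0 < j → j < heap.length → (j - 1) / 2 = pos → 0 < pos →
      heap.getD ((pos - 1) / 2) 0 ≤ heap.getD j 0)
    (hC : 0 < pos → heap.getD ((pos - 1) / 2) 0 ≤ heap.getD pos 0) :
    (siftup heap pos).Perm heap ∧ HP (siftup heap pos) := by
  obtain ⟨sperm, srlt, sleaf, sanc, sAout, sbelow⟩ :=
    siftupLoop_spec heap heap.length pos rfl hpos hA hB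
  set r := siftupLoop heap heap.length pos with hr
  set newitem := heap.getD pos 0 with hni
  have hr1len : r.1.length = heap.length := by
    have := (sperm 0).length_eq
    simpa using this
  have hrl : r.2 < r.1.length := by omega
  have hdef : siftup heap pos = siftdown (r.1.set r.2 newitem) pos r.2 := rfl
  have hg2 : ∀ j, (r.1.set r.2 newitem).getD j 0 =
      if j = r.2 then newitem else r.1.getD j 0 :=
    fun j => getD_set' r.1 r.2 j newitem hrl
  have hlen2 : (r.1.set r.2 newitem).length = heap.length := by simp [hr1len]
  obtain ⟨dperm, dhp⟩ := siftdown_spec (r.1.set r.2 newitem) pos r.2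
    (by omega) sanc
    (by intro j hj0 hjl hj1 hj2
        rw [hlen2] at hjl
        rw [hg2 j, if_neg hj1, hg2 ((j - 1) / 2), if_neg hj2]
        exact sAout j hj0 hjl hj1 hj2)
    (by intro j hj0 hjl hjpar
        rw [hlen2] at hjl
        omega)
    (by intro j hj0 hjl hjpar
        rw [hlen2] at hjl
        intro _
        omega)
    (by intro hp0
        have hple := isAnc_le pos r.2 sanc
        have hppos : (pos - 1) / 2 < pos := by omega
        rw [hg2 ((pos - 1) / 2), if_neg (by omega), hg2 r.2, if_pos rfl,
          sbelow ((pos - 1) / 2) hppos]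
        exact hC hp0)
  rw [hdef]
  refine ⟨?_, dhp⟩
  refine dperm.trans ?_
  have hset : heap.set pos newitem = heap := by
    rw [hni, List.getD_eq_getElem heap 0 hpos]; exact List.set_getElem_self hpos
  have h3 := sperm newitem
  rw [hset] at h3
  exact h3

theorem heappush_spec (heap : List Int) (x : Int) (hhp : HP heap) :
    (heappush heap x).Perm (x :: heap) ∧ HP (heappush heap x) := by
  have hlen : (heap ++ [x]).length = heap.length + 1 := by simp
  have hpos : heap.length < (heap ++ [x]).length := by omega
  have hgap : ∀ k, k < heap.length → (heap ++ [x]).getD k 0 = heap.getD k 0 :=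
    fun k hk => List.getD_append heap [x] 0 k hk
  obtain ⟨hperm, hhp2⟩ := siftdown_spec (heap ++ [x]) 0 heap.length hpos (isAnc_zero _)
    (by intro j hj0 hjl hj1 hj2
        rw [hlen] at hjl
        have hjlt : j < heap.length := by omega
        have hplt : (j - 1) / 2 < heap.length := by omega
        rw [hgap j hjlt, hgap _ hplt]
        exact hhp j hj0 hjlt)
    (by intro j hj0 hjl hjpar
        rw [hlen] at hjl
        omega)
    (by intro j hj0 hjl hjpar
        rw [hlen] at hjl
        omega)
    (by omega)
  have hdef : heappush heap x = siftdown (heap ++ [x]) 0 ((heap ++ [x]).length - 1) := rfl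
  have hidx : (heap ++ [x]).length - 1 = heap.length := by omega
  rw [hdef, hidx]
  exact ⟨hperm.trans (List.perm_append_singleton x heap), hhp2⟩

theorem heappop_spec (heap : List Int) (hne : heap ≠ []) (hhp : HP heap) :
    (heappop heap).1 = heap.getD 0 0 ∧ HP (heappop heap).2 ∧
      ((heappop heap).1 :: (heappop heap).2).Perm heap := by
  by_cases h1 : heap.dropLast.isEmpty
  · have hlen1 : heap.length = 1 := by
      rw [List.isEmpty_iff] at h1
      have := congrArg List.length h1
      simp at this
      have := List.length_pos_of_ne_nil hne
      omega
    obtain ⟨a, rfl⟩ : ∃ a, heap = [a] := by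
      cases heap with
      | nil => simp at hlen1
      | cons b t =>
        cases t with
        | nil => exact ⟨b, rfl⟩
        | cons c u => simp at hlen1
    have hdef : heappop [a] = (a, []) := rfl
    rw [hdef]
    refine ⟨rfl, ?_, List.Perm.refl _⟩
    intro j hj0 hjl
    simp at hjl
  · have hrne : heap.dropLast ≠ [] := by
      simpa [List.isEmpty_iff] using h1
    have hrlen : heap.dropLast.length = heap.length - 1 := by simp
    have hrpos : 0 < heap.dropLast.length := List.length_pos_of_ne_nil hrne
    have hlen2 : 2 ≤ heap.length := by omega
    set lastelt := heap.getD (heap.length - 1) 0 with hle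
    set rest := heap.dropLast with hrest
    have hdef : heappop heap = (rest.getD 0 0, siftup (rest.set 0 lastelt) 0) := by
      rw [heappop]
      simp only [← hle, ← hrest, if_neg h1]
    have hgd : ∀ k, k < rest.length → rest.getD k 0 = heap.getD k 0 := by
      intro k hk
      rw [List.getD_eq_getElem rest 0 hk, List.getD_eq_getElem heap 0 (by omega)]
      exact List.getElem_dropLast hk
    have hsetlen : (rest.set 0 lastelt).length = rest.length := by simp
    have hg3 : ∀ j, (rest.set 0 lastelt).getD j 0 =
        if j = 0 then lastelt else rest.getD j 0 :=
      fun j => getD_set' rest 0 j lastelt hrpos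
    obtain ⟨sperm, shp⟩ := siftup_spec (rest.set 0 lastelt) 0 (by omega)
      (by intro j hj0 hjl hj1 hj2
          rw [hsetlen] at hjl
          rw [hg3 j, if_neg (by omega), hg3 ((j - 1) / 2), if_neg (by omega)]
          rw [hgd j hjl, hgd _ (by omega)]
          exact hhp j hj0 (by omega))
      (by intro j hj0 hjl hjpar h0; omega)
      (by intro h0; omega)
    rw [hdef]
    refine ⟨hgd 0 hrpos, shp, ?_⟩
    have hself : rest.set 0 (rest.getD 0 0) = rest := by
      rw [List.getD_eq_getElem rest 0 hrpos]; exact List.set_getElem_self hrpos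
    have hsc := set_cross rest 0 lastelt (rest.getD 0 0) hrpos
    rw [hself] at hsc
    have hlast : lastelt = heap.getLast hne := by
      rw [hle, List.getD_eq_getElem heap 0 (by omega), List.getLast_eq_getElem hne]
    have hperm2 : (lastelt :: rest).Perm heap := by
      rw [hlast, hrest]
      have h4 := (List.perm_append_singleton (heap.getLast hne) heap.dropLast).symm
      rwa [List.dropLast_concat_getLast hne] at h4
    exact ((sperm.cons (rest.getD 0 0)).trans hsc).trans hperm2

theorem foldl_siftup_spec (l : List Int) :
    ∀ (is : List Nat) (st : List Int), (∀ i ∈ is, i < l.length) → st.length = l.length →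
      HP st → st.Perm l →
      (is.foldl (fun h i => siftup h i) st).Perm l ∧ HP (is.foldl (fun h i => siftup h i) st) := by
  intro is
  induction is with
  | nil => intro st _ _ hhp hperm; exact ⟨hperm, hhp⟩
  | cons i is' ih =>
    intro st hmem hlen hhp hperm
    have hi : i < st.length := by rw [hlen]; exact hmem i (by simp)
    obtain ⟨sperm, shp⟩ := siftup_spec st i hi
      (by intro j hj0 hjl hj1 hj2; exact hhp j hj0 hjl)
      (by intro j hj0 hjl hjpar hi0
          exact le_trans (hhp i hi0 hi) (by rw [← hjpar]; exact hhp j hj0 hjl))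
      (by intro hi0; exact hhp i hi0 hi)
    simp only [List.foldl_cons]
    exact ih (siftup st i) (fun k hk => hmem k (by simp [hk]))
      (by rw [sperm.length_eq, hlen]) shp (sperm.trans hperm)

theorem heapify_spec (l : List Int) (hhp : HP l) :
    (heapify l).Perm l ∧ HP (heapify l) := by
  unfold heapify
  exact foldl_siftup_spec l _ l
    (by intro i hi
        simp only [List.mem_reverse, List.mem_range] at hi
        omega)
    rfl hhp (List.Perm.refl l)

theorem HP_of_pairwise (l : List Int) (h : l.Pairwise (· ≤ ·)) : HP l := by
  intro j hj0 hjl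
  have hplt : (j - 1) / 2 < j := by omega
  rw [List.getD_eq_getElem l 0 (by omega), List.getD_eq_getElem l 0 hjl]
  exact List.pairwise_iff_getElem.mp h _ _ (by omega) hjl hplt

theorem root_le_mem (l : List Int) (h : HP l) : ∀ x ∈ l, l.getD 0 0 ≤ x := by
  intro x hx
  obtain ⟨i, hi, rfl⟩ := List.mem_iff_getElem.mp hx
  rw [← List.getD_eq_getElem l 0 hi]
  exact hp_root_le l h i hi

theorem insort_perm (x : Int) (s : List Int) : (insort x s).Perm (x :: s) := by
  induction s with
  | nil => exact List.Perm.refl _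
  | cons y ys ih =>
    rw [insort]
    split
    · exact (ih.cons y).trans (List.Perm.swap x y ys)
    · exact List.Perm.refl _

theorem insort_pairwise (x : Int) (s : List Int) (h : s.Pairwise (· ≤ ·)) :
    (insort x s).Pairwise (· ≤ ·) := by
  induction s with
  | nil => simp [insort]
  | cons y ys ih =>
    obtain ⟨hy, hys⟩ := List.pairwise_cons.mp h
    rw [insort]
    split
    · rename_i hyx
      rw [List.pairwise_cons]
      refine ⟨?_, ih hys⟩
      intro z hz
      have hz2 := (insort_perm x ys).mem_iff.mp hz
      rcases List.mem_cons.mp hz2 with rfl | hzys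
      · exact hyx
      · exact hy z hzys
    · rename_i hyx
      rw [List.pairwise_cons]
      refine ⟨?_, h⟩
      intro z hz
      rcases List.mem_cons.mp hz with rfl | hzys
      · omega
      · exact le_of_lt (lt_of_lt_of_le (by omega) (hy z hzys))

theorem loop_sim : ∀ (n : Nat) (h s : List Int) (K ans : Int), h.length = n → HP h →
    s.Pairwise (· ≤ ·) → h.Perm s → solutionLoop h K ans = altLoop s K ans := by
  intro n
  induction n using Nat.strong_induction_on with
  | _ n ih =>
    intro h s K ans hlen hhp hsp hperm
    cases h with
    | nil =>
      have hs : s = [] := List.length_eq_zero_iff.mp (by simpa using hperm.length_eq.symm)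
      subst hs
      simp [solutionLoop, altLoop]
    | cons a t =>
      obtain ⟨b, u, rfl⟩ : ∃ b u, s = b :: u := by
        cases s with
        | nil => have := hperm.length_eq; simp at this
        | cons b u => exact ⟨b, u, rfl⟩
      have hamem : a ∈ b :: u := hperm.mem_iff.mp (by simp)
      have hbmem : b ∈ a :: t := hperm.mem_iff.mpr (by simp)
      have hbmin : ∀ x ∈ b :: u, b ≤ x := by
        intro x hx
        rcases List.mem_cons.mp hx with rfl | hxu
        · exact le_refl x
        · exact (List.pairwise_cons.mp hsp).1 x hxu
      have hamin : ∀ x ∈ a :: t, a ≤ x := by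
        have := root_le_mem (a :: t) hhp
        simpa using this
      have hab : a = b := le_antisymm (hamin b hbmem) (hbmin a hamem)
      subst hab
      by_cases hK : a < K
      · cases u with
        | nil =>
          have ht : t = [] := by
            have := hperm.length_eq; simp at this
            exact this
          subst ht
          simp [solutionLoop, altLoop, hK]
        | cons c v =>
          have htlen : t.length = v.length + 1 := by
            have := hperm.length_eq; simpa using this
          have hlt2 : ¬ ((a :: t).length < 2) := by simp only [List.length_cons]; omega
          simp only [solutionLoop, altLoop]
          rw [if_pos hK, if_pos hK, dif_neg hlt2]
          have hne1 : (a :: t) ≠ [] := by simp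
          obtain ⟨hret1, hhp1, hperm1⟩ := heappop_spec (a :: t) hne1 hhp
          have hret1' : (heappop (a :: t)).1 = a := by rw [hret1]; rfl
          have hlen1 : (heappop (a :: t)).2.length = t.length := by
            have := hperm1.length_eq; simp at this; omega
          have hne2 : (heappop (a :: t)).2 ≠ [] := by
            intro hh; rw [hh] at hlen1; simp at hlen1; omega
          obtain ⟨hret2, hhp2, hperm2⟩ := heappop_spec (heappop (a :: t)).2 hne2 hhp1
          have hperm1' : (heappop (a :: t)).2.Perm (c :: v) := by
            have h5 : ((heappop (a :: t)).1 :: (heappop (a :: t)).2).Perm (a :: c :: v) :=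
              hperm1.trans hperm
            rw [hret1'] at h5
            exact h5.cons_inv
          have hspcv : (c :: v).Pairwise (· ≤ ·) := (List.pairwise_cons.mp hsp).2
          have hcmin : ∀ x ∈ c :: v, c ≤ x := by
            intro x hx
            rcases List.mem_cons.mp hx with rfl | hxv
            · exact le_refl x
            · exact (List.pairwise_cons.mp hspcv).1 x hxv
          have hret2' : (heappop (heappop (a :: t)).2).1 = c := by
            rw [hret2]
            have hd0mem : (heappop (a :: t)).2.getD 0 0 ∈ (heappop (a :: t)).2 := by
              rw [List.getD_eq_getElem _ 0 (by omega)]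
              exact List.getElem_mem _
            have h6 : c ≤ (heappop (a :: t)).2.getD 0 0 :=
              hcmin _ (hperm1'.mem_iff.mp hd0mem)
            have h7 : (heappop (a :: t)).2.getD 0 0 ≤ c :=
              root_le_mem _ hhp1 c (hperm1'.mem_iff.mpr (by simp))
            omega
          have hperm2' : (heappop (heappop (a :: t)).2).2.Perm v := by
            have h8 := hperm2.trans hperm1'
            rw [hret2'] at h8
            exact h8.cons_inv
          rw [hret1', hret2']
          obtain ⟨hpushperm, hpushhp⟩ :=
            heappush_spec (heappop (heappop (a :: t)).2).2 (a + c * 2) hhp2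
          have hpushlen : (heappush (heappop (heappop (a :: t)).2).2 (a + c * 2)).length
              = v.length + 1 := by
            rw [heappush_length, hperm2'.length_eq]
          have hvn : v.length + 1 < n := by
            rw [← hlen, List.length_cons, htlen]
            omega
          exact ih (v.length + 1) hvn _ _ K (ans + 1) hpushlen hpushhp
            (insort_pairwise _ _ (List.pairwise_cons.mp hspcv).2)
            (hpushperm.trans ((hperm2'.cons _).trans (insort_perm _ v).symm))
      · cases u with
        | nil => simp [solutionLoop, altLoop, hK]
        | cons c v => simp [solutionLoop, altLoop, hK]

theorem solution_eq_alt (scoville : List Int) (K : Int) :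
    solution scoville K = solution_alt scoville K := by
  unfold solution solution_alt
  have hsp : (PySem.List.sorted scoville (fun x => x) false).Pairwise (· ≤ ·) := by
    simpa using PySem.List.sorted_pairwise (xs := scoville) (key := fun x => x)
  have hperm : (PySem.List.sorted scoville (fun x => x) false).Perm scoville :=
    PySem.List.sorted_perm scoville (fun x => x) false
  have hhp : HP (PySem.List.sorted scoville (fun x => x) false) := HP_of_pairwise _ hsp
  obtain ⟨hfp, hfh⟩ := heapify_spec _ hhp
  exact loop_sim _ _ _ K 0 rfl hfh hsp hfp

-- ===== VERDICT (by name: the statement is the Claim_ definition above) =====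
theorem solution_spec : Claim_equal_solution := by
  intro scoville K _ _
  unfold Spec_solution
  exact solution_eq_alt scoville K
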